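-- pv_equiv track=rewrite | github.com/zahra-1375/MML_BOT | main.py | is_english_name
-- ===== SOURCE A (Python) =====
-- def is_english_name(text: str) -> bool:
--     if not text:
--         return False
--     allowed_extra = set(" -'")
--     has_letter = False
--     for ch in text:
--         if ch.isascii() and ch.isalpha():
--             has_letter = True
--             continue
--         if ch in allowed_extra:
--             continue
--         return False
--     return has_letter
-- ===== SOURCE B (Python) =====
-- def is_english_name(text: str) -> bool:
--     allowed = set(" -'")
--     def letter(ch):
--         return ch.isascii() and ch.isalpha()
--     return all(letter(ch) or ch in allowed for ch in text) and any(letter(ch) for ch in text)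
-- ===== Notes on version B (the rewrite author's own statement) =====
-- stated objective: simpler
-- what changed: Replaces A's single fused loop with boolean state (has_letter flag, continue/early-return) by two independent declarative passes: all characters allowed, and at least one ASCII letter; the empty-string guard disappears because any() is already False on empty input.
import Mathlib
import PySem

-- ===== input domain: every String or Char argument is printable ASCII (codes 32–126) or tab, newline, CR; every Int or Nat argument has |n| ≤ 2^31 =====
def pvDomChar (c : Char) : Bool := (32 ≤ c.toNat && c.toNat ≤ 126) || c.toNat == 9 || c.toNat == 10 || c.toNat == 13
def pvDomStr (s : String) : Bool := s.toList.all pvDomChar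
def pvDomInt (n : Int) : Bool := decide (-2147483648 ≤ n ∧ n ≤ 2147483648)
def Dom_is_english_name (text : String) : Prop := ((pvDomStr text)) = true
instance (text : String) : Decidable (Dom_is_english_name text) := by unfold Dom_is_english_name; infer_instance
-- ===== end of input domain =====

-- B replaces A's fused stateful loop by two independent passes (all allowed ∧ any letter); equal return values, no side effects.

-- ===== PORT A =====
-- ch.isascii() and ch.isalpha(): on the ASCII domain this is exactly an ASCII letter
def pvLetter (c : Char) : Bool := ('a' ≤ c && c ≤ 'z') || ('A' ≤ c && c ≤ 'Z')
-- membership in set(" -'")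
def pvAllowed (c : Char) : Bool := c == ' ' || c == '-' || c == '\''

-- A's for-loop with the has_letter flag, early return on a bad character
def isEngLoop : List Char → Bool → Bool
  | [], has => has
  | c :: rest, has =>
    if pvLetter c then isEngLoop rest true
    else if pvAllowed c then isEngLoop rest has
    else false

def is_english_name (text : String) : Bool :=
  if text.toList = [] then false
  else isEngLoop text.toList false

-- ===== PORT B =====
def is_english_name_alt (text : String) : Bool :=
  (text.toList.all (fun c => pvLetter c || pvAllowed c)) && (text.toList.any pvLetter)

-- ===== PRECONDITION & SPEC =====
def Spec_is_english_name (text : String) (out : Bool) : Prop := out = is_english_name_alt text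
instance (text : String) (out : Bool) : Decidable (Spec_is_english_name text out) := by unfold Spec_is_english_name; infer_instance

-- ===== CLAIM (what is proved, stated in full; the proofs are below) =====
def Claim_equal_is_english_name : Prop := ∀ (text : String), Dom_is_english_name text → Spec_is_english_name text (is_english_name text)

-- ===== LEMMAS AND PROOFS =====
theorem isEngLoop_eq (l : List Char) (has : Bool) :
    isEngLoop l has = ((l.all (fun c => pvLetter c || pvAllowed c)) && (has || l.any pvLetter)) := by
  induction l generalizing has with
  | nil => simp [isEngLoop]
  | cons c rest ih =>
    by_cases h1 : pvLetter c = true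
    · simp [isEngLoop, h1, ih]
    · by_cases h2 : pvAllowed c = true
      · simp [isEngLoop, h1, h2, ih]
      · simp [isEngLoop, h1, h2]

-- ===== VERDICT (by name: the statement is the Claim_ definition above) =====
theorem is_english_name_spec : Claim_equal_is_english_name := by
  intro text _
  unfold Spec_is_english_name is_english_name is_english_name_alt
  cases h : text.toList with
  | nil => simp [h]
  | cons c rest => simp [h, isEngLoop_eq]
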